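-- pv_equiv track=rewrite | github.com/mwestera/py4ling | solutions/section14.py | has_at_most_n_vowels
-- ===== SOURCE A (Python) =====
-- def has_at_most_n_vowels(strings, n):
--     """
--     Returns False if the list of strings contains more than n vowels.
--     """
--     n_vowels = 0
--     for string in strings:
--         for character in string:
--             if character.lower() in 'aeiou':
--                 n_vowels += 1
--             if n_vowels > n:
--                 return False
--     return True
-- ===== SOURCE B (Python) =====
-- def has_at_most_n_vowels(strings, n):
--     """
--     Returns False if the list of strings contains more than n vowels.
--     """
--     text = "".join(strings).lower()
--     return sum(text.count(v) for v in "aeiou") <= n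
-- ===== Notes on version B (the rewrite author's own statement) =====
-- stated objective: simpler
-- what changed: Instead of a character-by-character scan with a running counter and an early return, B joins all strings, lowercases once, sums the five per-vowel str.count scans (C-level loops) and compares the total to n.
-- intended difference: When n is negative and every string is empty, A returns True because its n_vowels > n check only runs inside the character loop, while B returns False, which is intended since 0 vowels is not at most a negative n (A itself returns False for n < 0 whenever any character exists). — e.g. on has_at_most_n_vowels([""], -1): A returns true, B returns false
import Mathlib
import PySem

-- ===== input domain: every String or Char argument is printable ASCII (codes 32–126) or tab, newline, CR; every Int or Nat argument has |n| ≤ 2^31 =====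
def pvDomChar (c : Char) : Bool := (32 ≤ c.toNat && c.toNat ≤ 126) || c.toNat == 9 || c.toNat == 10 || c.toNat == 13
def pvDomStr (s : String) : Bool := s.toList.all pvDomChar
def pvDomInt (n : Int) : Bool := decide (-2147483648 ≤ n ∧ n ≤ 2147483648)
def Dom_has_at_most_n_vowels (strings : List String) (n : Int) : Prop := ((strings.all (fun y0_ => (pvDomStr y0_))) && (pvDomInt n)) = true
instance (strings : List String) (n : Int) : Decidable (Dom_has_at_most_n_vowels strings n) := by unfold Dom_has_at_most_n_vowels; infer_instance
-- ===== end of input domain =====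

-- B joins all strings, lowercases once and sums five per-vowel str.count scans instead of A's
-- character-by-character membership scan with a running counter and an early return (objective: simpler).

-- ===== PORT A =====
-- inner 'for character in string' loop; none = the early 'return False'
def pvAInner (n : Int) : List Char → Int → Option Int
  | [], cnt => some cnt
  | c :: cs, cnt =>
    let cnt' := if PySem.Str.isIn (String.ofList [PySem.Chars.lowerChar c]) "aeiou" then cnt + 1 else cnt
    if cnt' > n then none else pvAInner n cs cnt'

-- outer 'for string in strings' loop
def pvALoop (n : Int) : List String → Int → Bool
  | [], _ => true
  | s :: rest, cnt =>
    match pvAInner n s.toList cnt with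
    | none => false
    | some cnt' => pvALoop n rest cnt'

def has_at_most_n_vowels (strings : List String) (n : Int) : Bool :=
  pvALoop n strings 0

-- ===== PORT B =====
def has_at_most_n_vowels_alt (strings : List String) (n : Int) : Bool :=
  let text := PySem.Str.lower (PySem.Str.join "" strings)
  decide ((("aeiou".toList.map (fun v => (PySem.Str.count text (String.ofList [v]) : Int))).sum) ≤ n)

-- ===== PRECONDITION & SPEC =====
-- When n is negative and every string is empty, A returns True because its 'n_vowels > n' check only
-- runs inside the character loop, while B returns False, which is intended since 0 vowels is not at
-- most a negative n (A itself returns False for n < 0 whenever any character exists).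
def D_has_at_most_n_vowels (strings : List String) (n : Int) : Prop :=
  n < 0 ∧ ∀ s ∈ strings, s = ""
instance (strings : List String) (n : Int) : Decidable (D_has_at_most_n_vowels strings n) := by
  unfold D_has_at_most_n_vowels; infer_instance
def Spec_has_at_most_n_vowels (strings : List String) (n : Int) (out : Bool) : Prop :=
  ¬ D_has_at_most_n_vowels strings n → out = has_at_most_n_vowels_alt strings n
instance (strings : List String) (n : Int) (out : Bool) : Decidable (Spec_has_at_most_n_vowels strings n out) := by
  unfold Spec_has_at_most_n_vowels; infer_instance
def pvDiffWitness_has_at_most_n_vowels : List String × Int := ([""], -1)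
def pvDiffWitnessOut_has_at_most_n_vowels : Bool × Bool := (true, false)

-- ===== CLAIM (what is proved, stated in full; the proofs are below) =====
def Claim_unchanged_has_at_most_n_vowels : Prop := ∀ (strings : List String) (n : Int), Dom_has_at_most_n_vowels strings n → Spec_has_at_most_n_vowels strings n (has_at_most_n_vowels strings n)
def Claim_changed_has_at_most_n_vowels : Prop := Dom_has_at_most_n_vowels (pvDiffWitness_has_at_most_n_vowels.1) (pvDiffWitness_has_at_most_n_vowels.2) ∧ D_has_at_most_n_vowels (pvDiffWitness_has_at_most_n_vowels.1) (pvDiffWitness_has_at_most_n_vowels.2) ∧ has_at_most_n_vowels (pvDiffWitness_has_at_most_n_vowels.1) (pvDiffWitness_has_at_most_n_vowels.2) = pvDiffWitnessOut_has_at_most_n_vowels.1 ∧ has_at_most_n_vowels_alt (pvDiffWitness_has_at_most_n_vowels.1) (pvDiffWitness_has_at_most_n_vowels.2) = pvDiffWitnessOut_has_at_most_n_vowels.2 ∧ pvDiffWitnessOut_has_at_most_n_vowels.1 ≠ pvDiffWitnessOut_has_at_most_n_vowels.2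
def Claim_exact_has_at_most_n_vowels : Prop := ∀ (strings : List String) (n : Int), Dom_has_at_most_n_vowels strings n → D_has_at_most_n_vowels strings n → has_at_most_n_vowels strings n ≠ has_at_most_n_vowels_alt strings n

-- ===== LEMMAS AND PROOFS =====

-- the vowel test A performs on each character
def pvIsVow (c : Char) : Bool :=
  PySem.Str.isIn (String.ofList [PySem.Chars.lowerChar c]) "aeiou"

-- the total number of vowels, the quantity both programs compare with n
def pvTotal (strings : List String) : Nat :=
  (strings.map (fun s => s.toList.countP pvIsVow)).sum

theorem pv_isIn_singleton (c : Char) :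
    PySem.Str.isIn (String.ofList [c]) "aeiou" = decide (c ∈ ['a', 'e', 'i', 'o', 'u']) := by
  rw [PySem.Str.isIn_eq]
  rw [String.toList_ofList, show ("aeiou" : String).toList = ['a','e','i','o','u'] by decide]
  cases h : PySem.Chars.isIn [c] ['a','e','i','o','u'] with
  | true =>
    rw [PySem.Chars.isIn_iff_infix] at h
    have := (List.singleton_infix_iff c _).mp h
    simp [this]
  | false =>
    rw [PySem.Chars.isIn_eq_false_iff] at h
    simp [show c ∉ (['a','e','i','o','u'] : List Char) from
      fun hc => h ((List.singleton_infix_iff c _).mpr hc)]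

theorem pvAInner_eq (n : Int) (cs : List Char) (cnt : Int)
    (h : cs ≠ [] ∨ cnt ≤ n) :
    pvAInner n cs cnt =
      if cnt + (cs.countP pvIsVow : Int) ≤ n then some (cnt + (cs.countP pvIsVow : Int)) else none := by
  induction cs generalizing cnt with
  | nil =>
    rcases h with h | h
    · exact absurd rfl h
    · simp [pvAInner, h]
  | cons c t ih =>
    simp only [pvAInner, List.countP_cons]
    by_cases hv : pvIsVow c = true
    · rw [show (PySem.Str.isIn (String.ofList [PySem.Chars.lowerChar c]) "aeiou") = true from hv]
      simp only [if_true, hv]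
      by_cases hgt : cnt + 1 > n
      · rw [if_pos hgt, if_neg (by push_cast; omega)]
      · rw [if_neg hgt, ih (cnt + 1) (Or.inr (by omega))]
        push_cast
        split_ifs with h1 h2 h2 <;> first | rfl | (exfalso; omega) | (congr 1; omega)
    · rw [show (PySem.Str.isIn (String.ofList [PySem.Chars.lowerChar c]) "aeiou") = false from
        Bool.eq_false_iff.mpr hv]
      simp only [Bool.false_eq_true, if_false, hv]
      simp only [Nat.add_zero]
      by_cases hgt : cnt > n
      · rw [if_pos hgt, if_neg (by omega)]
      · rw [if_neg hgt, ih cnt (Or.inr (by omega))]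

theorem pvALoop_eq (n : Int) (ls : List String) (cnt : Int)
    (h : (∃ s ∈ ls, s.toList ≠ []) ∨ cnt ≤ n) :
    pvALoop n ls cnt = decide (cnt + (pvTotal ls : Int) ≤ n) := by
  induction ls generalizing cnt with
  | nil =>
    rcases h with ⟨s, hs, _⟩ | h
    · simp at hs
    · simp [pvALoop, pvTotal, h]
  | cons s rest ih =>
    by_cases hs : s.toList = []
    · have hinner : pvAInner n s.toList cnt = some cnt := by rw [hs]; rfl
      simp only [pvALoop, hinner]
      have h' : (∃ t ∈ rest, t.toList ≠ []) ∨ cnt ≤ n := by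
        rcases h with ⟨t, ht, hne⟩ | h
        · rcases List.mem_cons.mp ht with rfl | ht'
          · exact absurd hs hne
          · exact Or.inl ⟨t, ht', hne⟩
        · exact Or.inr h
      rw [ih cnt h']
      simp [pvTotal, hs]
    · rw [show pvALoop n (s :: rest) cnt =
        (match pvAInner n s.toList cnt with
         | none => false
         | some cnt' => pvALoop n rest cnt') from rfl]
      rw [pvAInner_eq n s.toList cnt (Or.inl hs)]
      set k : Nat := s.toList.countP pvIsVow with hk
      by_cases hle : cnt + (k : Int) ≤ n
      · rw [if_pos hle]
        simp only []
        rw [ih (cnt + k) (Or.inr hle)]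
        have : pvTotal (s :: rest) = k + pvTotal rest := by simp [pvTotal, hk]
        rw [this]; push_cast; ring_nf
      · rw [if_neg hle]
        have : ¬ (cnt + (pvTotal (s :: rest) : Int) ≤ n) := by
          have : pvTotal (s :: rest) = k + pvTotal rest := by simp [pvTotal, hk]
          omega
        simp [this]

-- Chars.count with a one-character needle is the plain character count
theorem pv_count_go_singleton (v : Char) (l : List Char) (fuel acc : Nat)
    (h : l.length ≤ fuel) :
    PySem.Chars.count.go [v] fuel l acc = acc + l.count v := by
  induction l generalizing fuel acc with
  | nil => cases fuel <;> simp [PySem.Chars.count.go]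
  | cons c t ih =>
    cases fuel with
    | zero => simp at h
    | succ fuel =>
      have hp : (([v] : List Char).isPrefixOf (c :: t)) = (v == c) := by
        simp [List.isPrefixOf]
      simp only [PySem.Chars.count.go, hp]
      have ht : t.length ≤ fuel := by simpa using h
      by_cases hc : v = c
      · subst hc
        simp only [BEq.rfl]
        rw [show ([v] : List Char).length = 1 from rfl, List.drop_one, List.tail_cons]
        rw [ih fuel (acc + 1) ht]
        simp; omega
      · have hb : (v == c) = false := by simp [hc]
        simp only [hb, Bool.false_eq_true, if_false]
        rw [ih fuel acc ht]
        simp [Ne.symm hc]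

theorem pv_count_singleton (v : Char) (l : List Char) :
    PySem.Chars.count l [v] = l.count v := by
  simpa using pv_count_go_singleton v l l.length 0 le_rfl

-- the five per-vowel counts sum to the single countP
theorem pv_sum5 (l : List Char) :
    l.count 'a' + l.count 'e' + l.count 'i' + l.count 'o' + l.count 'u'
      = l.countP (fun c => decide (c ∈ ['a', 'e', 'i', 'o', 'u'])) := by
  induction l with
  | nil => rfl
  | cons c t ih =>
    simp only [List.count_cons, List.countP_cons, List.mem_cons, List.not_mem_nil, or_false]
    split_ifs <;> simp_all <;> omega

theorem pv_join_nil_flatten (parts : List (List Char)) :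
    PySem.Chars.join [] parts = parts.flatten := by
  induction parts with
  | nil => simp [PySem.Chars.join, List.intercalate]
  | cons a rest ih =>
    cases rest with
    | nil => simp [PySem.Chars.join, List.intercalate]
    | cons b r =>
      rw [PySem.Chars.join_cons_cons]
      simp only [List.flatten_cons, ← ih]
      simp

theorem pvB_eq (strings : List String) (n : Int) :
    has_at_most_n_vowels_alt strings n = decide ((pvTotal strings : Int) ≤ n) := by
  have htext : (PySem.Str.lower (PySem.Str.join "" strings)).toList
      = ((strings.map String.toList).flatten.map PySem.Chars.lowerChar) := by
    rw [PySem.Str.toList_lower, PySem.Str.toList_join,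
      show ("" : String).toList = [] from rfl, pv_join_nil_flatten]
    rfl
  unfold has_at_most_n_vowels_alt
  simp only [show ("aeiou" : String).toList = ['a','e','i','o','u'] by decide,
    List.map_cons, List.map_nil, List.sum_cons, List.sum_nil,
    PySem.Str.count_eq, String.toList_ofList, htext, pv_count_singleton]
  have hfun : pvIsVow = fun c => decide (PySem.Chars.lowerChar c ∈ (['a','e','i','o','u'] : List Char)) :=
    funext fun c => pv_isIn_singleton (PySem.Chars.lowerChar c)
  have htot : pvTotal strings
      = ((strings.map String.toList).flatten.map PySem.Chars.lowerChar).countP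
          (fun c => decide (c ∈ (['a','e','i','o','u'] : List Char))) := by
    rw [List.countP_map]
    calc pvTotal strings
        = ((strings.map String.toList).map (List.countP pvIsVow)).sum := by
          simp [pvTotal, List.map_map]; rfl
      _ = (strings.map String.toList).flatten.countP pvIsVow := List.countP_flatten.symm
      _ = _ := by rw [hfun]; rfl
  rw [htot, ← pv_sum5, decide_eq_decide]
  push_cast
  omega

-- A's loop is 'total count ≤ n' whenever some character exists or n is nonnegative
theorem pvA_eq (strings : List String) (n : Int)
    (h : (∃ s ∈ strings, s.toList ≠ []) ∨ (0 : Int) ≤ n) :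
    has_at_most_n_vowels strings n = decide ((pvTotal strings : Int) ≤ n) := by
  unfold has_at_most_n_vowels
  rw [pvALoop_eq n strings 0 (h.imp id id)]
  norm_num

-- on all-empty input A's loop never runs
theorem pvALoop_all_empty (n : Int) (ls : List String) (hall : ∀ s ∈ ls, s = "")
    (cnt : Int) : pvALoop n ls cnt = true := by
  induction ls generalizing cnt with
  | nil => rfl
  | cons s rest ih =>
    have hs : s.toList = [] := by rw [hall s (List.mem_cons_self)]; rfl
    have hinner : pvAInner n s.toList cnt = some cnt := by rw [hs]; rfl
    simp only [pvALoop, hinner]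
    exact ih (fun t ht => hall t (List.mem_cons_of_mem s ht)) cnt

theorem pvTotal_all_empty (ls : List String) (hall : ∀ s ∈ ls, s = "") :
    pvTotal ls = 0 := by
  apply List.sum_eq_zero
  intro x hx
  obtain ⟨s, hs, rfl⟩ := List.mem_map.mp hx
  rw [hall s hs]
  rfl

-- ===== VERDICT (by name: the statement is the Claim_ definition above) =====
theorem has_at_most_n_vowels_spec : Claim_unchanged_has_at_most_n_vowels := by
  intro strings n _
  unfold Spec_has_at_most_n_vowels D_has_at_most_n_vowels
  intro hnd
  push_neg at hnd
  rw [pvB_eq]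
  apply pvA_eq
  by_cases hn : (0 : Int) ≤ n
  · exact Or.inr hn
  · obtain ⟨s, hs, hne⟩ := hnd (by omega)
    exact Or.inl ⟨s, hs, fun h => hne (String.toList_eq_nil_iff.mp h)⟩

theorem has_at_most_n_vowels_changed : Claim_changed_has_at_most_n_vowels := by
  unfold Claim_changed_has_at_most_n_vowels; decide

theorem has_at_most_n_vowels_tight : Claim_exact_has_at_most_n_vowels := by
  intro strings n _ ⟨hn, hall⟩
  rw [show has_at_most_n_vowels strings n = pvALoop n strings 0 from rfl,
    pvALoop_all_empty n strings hall 0, pvB_eq, pvTotal_all_empty strings hall]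
  simp [hn]
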